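-- pv_equiv track=rewrite | github.com/Brawek/sprawdzian_nierodka | 4.py | czy_mozna_zlozyc
-- ===== SOURCE A (Python) =====
-- def czy_mozna_zlozyc(n, magazyn):
--     temp = n
--     d = 2
--     kopia_magazynu = magazyn.copy()
--     while d * d <= temp:
--         while temp % d == 0:
--             if d not in kopia_magazynu or kopia_magazynu[d] <= 0:
--                 return False
--             kopia_magazynu[d] -= 1
--             temp //= d
--         d += 1
--     if temp > 1:
--         if temp not in kopia_magazynu or kopia_magazynu[temp] <= 0:
--             return False
--     return True
-- ===== SOURCE B (Python) =====
-- def _is_prime(p):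
--     if p < 2:
--         return False
--     d = 2
--     while d * d <= p:
--         if p % d == 0:
--             return False
--         d += 1
--     return True
--
--
-- def czy_mozna_zlozyc(n, magazyn):
--     # Warehouse-driven: instead of factorizing n, consume n with the warehouse's
--     # own prime stock; n is buildable iff nothing of it is left over.
--     if n < 2:
--         return True
--     temp = n
--     for p, c in magazyn.items():
--         if _is_prime(p):
--             k = c
--             while k > 0 and temp % p == 0:
--                 temp //= p
--                 k -= 1
--     return temp == 1
-- ===== Notes on version B (the rewrite author's own statement) =====
-- stated objective: alternative
-- what changed: A factorizes n by trial division and consumes/decrements a mutable copy of the warehouse with early exits; B never factorizes n: it iterates over the warehouse itself, dividing n by each prime key up to its stocked count, and succeeds iff the quotient reaches 1.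
import Mathlib
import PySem

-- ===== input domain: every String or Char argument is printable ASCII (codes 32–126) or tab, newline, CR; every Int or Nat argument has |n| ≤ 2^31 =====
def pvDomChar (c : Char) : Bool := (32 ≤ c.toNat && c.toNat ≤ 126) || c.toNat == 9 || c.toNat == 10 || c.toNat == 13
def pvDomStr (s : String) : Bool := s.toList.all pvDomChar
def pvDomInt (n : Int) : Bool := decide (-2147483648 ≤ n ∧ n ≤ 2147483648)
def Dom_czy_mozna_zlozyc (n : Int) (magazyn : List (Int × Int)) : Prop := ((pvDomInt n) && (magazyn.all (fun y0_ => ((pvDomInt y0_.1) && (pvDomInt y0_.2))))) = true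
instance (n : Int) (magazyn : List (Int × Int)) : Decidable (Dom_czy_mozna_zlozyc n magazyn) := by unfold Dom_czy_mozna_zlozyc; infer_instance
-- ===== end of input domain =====

-- B replaces A's algorithm (factorize n by trial division, consuming a mutable copy of the
-- warehouse with early exits) by a warehouse-driven one: B never factorizes n — it walks the
-- warehouse items, divides n by each prime key at most its stocked count of times, and
-- succeeds iff the quotient reaches 1.  Alternative structure, similar cost.

-- ===== PORT A =====
-- pvConsume is Python A's inner `while temp % d == 0` loop (decrement the warehouse copy,
-- early-return False = none); pvLoopA is the outer `while d * d <= temp` loop plus the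
-- final leftover-prime check.  The Nat fuel arguments are totality guards only: the fuel
-- supplied at each call site strictly exceeds the number of iterations the Python loop
-- performs there (inner: at most temp.toNat divisions; outer: the measure (temp+2-d).toNat
-- strictly decreases), so the fuel-exhausted branches are never reached.
def pvConsume : Nat → Int → Int → PySem.Dict Int Int → Option (Int × PySem.Dict Int Int)
  | 0, _, temp, kopia => some (temp, kopia)
  | fuel + 1, d, temp, kopia =>
    if PySem.Int.mod temp d = 0 then
      if !kopia.contains d || decide (kopia.getD d 0 ≤ 0) then none
      else pvConsume fuel d (PySem.Int.floordiv temp d) (kopia.insert d (kopia.getD d 0 - 1))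
    else some (temp, kopia)

def pvLoopA : Nat → Int → Int → PySem.Dict Int Int → Bool
  | 0, _, _, _ => false
  | fuel + 1, d, temp, kopia =>
    if d * d ≤ temp then
      match pvConsume (temp.toNat + 1) d temp kopia with
      | none => false
      | some (t', k') => pvLoopA fuel (d + 1) t' k'
    else if 1 < temp then
      !(!kopia.contains temp || decide (kopia.getD temp 0 ≤ 0))
    else true

def czy_mozna_zlozyc (n : Int) (magazyn : List (Int × Int)) : Bool :=
  pvLoopA (n.toNat + 1) 2 n (PySem.Dict.ofList magazyn)

-- ===== PORT B =====
-- Python B's helper _is_prime (the `while d*d <= p` loop is pvIsPrimeLoop), the inner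
-- `while k > 0 and temp % p == 0` loop (pvDivLoop), and the `for p, c in magazyn.items()`
-- loop as a foldl over the dict's items.  Fuel as in port A: pvIsPrimeLoop iterates at most
-- (p+2-d).toNat times, pvDivLoop at most k.toNat times.
def pvIsPrimeLoop : Nat → Int → Int → Bool
  | 0, _, _ => true
  | fuel + 1, d, p =>
    if d * d ≤ p then
      if PySem.Int.mod p d = 0 then false else pvIsPrimeLoop fuel (d + 1) p
    else true

def pvIsPrime (p : Int) : Bool :=
  if p < 2 then false else pvIsPrimeLoop (p.toNat + 1) 2 p

def pvDivLoop : Nat → Int → Int → Int → Int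
  | 0, _, _, temp => temp
  | fuel + 1, p, k, temp =>
    if 0 < k ∧ PySem.Int.mod temp p = 0 then
      pvDivLoop fuel p (k - 1) (PySem.Int.floordiv temp p)
    else temp

def czy_mozna_zlozyc_alt (n : Int) (magazyn : List (Int × Int)) : Bool :=
  if n < 2 then true
  else
    decide ((PySem.Dict.ofList magazyn).items.foldl
      (fun temp pc => if pvIsPrime pc.1 then pvDivLoop (pc.2.toNat + 1) pc.1 pc.2 temp else temp)
      n = 1)

-- ===== PRECONDITION & SPEC =====
def Spec_czy_mozna_zlozyc (n : Int) (magazyn : List (Int × Int)) (out : Bool) : Prop := out = czy_mozna_zlozyc_alt n magazyn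
instance (n : Int) (magazyn : List (Int × Int)) (out : Bool) : Decidable (Spec_czy_mozna_zlozyc n magazyn out) := by unfold Spec_czy_mozna_zlozyc; infer_instance

-- ===== CLAIM (what is proved, stated in full; the proofs are below) =====
def Claim_equal_czy_mozna_zlozyc : Prop := ∀ (n : Int) (magazyn : List (Int × Int)), Dom_czy_mozna_zlozyc n magazyn → Spec_czy_mozna_zlozyc n magazyn (czy_mozna_zlozyc n magazyn)

-- ===== LEMMAS AND PROOFS =====

-- Proof-side helpers: the (unported) trial-division factor list of temp starting at divisor d.
def pvCollect : Nat → Int → Int → List Int → Int × List Int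
  | 0, _, temp, fs => (temp, fs)
  | fuel + 1, d, temp, fs =>
    if PySem.Int.mod temp d = 0 then
      pvCollect fuel d (PySem.Int.floordiv temp d) (fs ++ [d])
    else (temp, fs)

def pvFactorLoop : Nat → Int → Int → List Int → List Int
  | 0, _, _, fs => fs
  | fuel + 1, d, temp, fs =>
    if d * d ≤ temp then
      pvFactorLoop fuel (d + 1) (pvCollect (temp.toNat + 1) d temp fs).1
        (pvCollect (temp.toNat + 1) d temp fs).2
    else if 1 < temp then fs ++ [temp] else fs

lemma pv_floordiv_lt (temp d : Int) (ht : 0 < temp) (hd : 2 ≤ d) :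
    0 ≤ PySem.Int.floordiv temp d ∧ PySem.Int.floordiv temp d < temp := by
  rw [PySem.Int.floordiv_eq_ediv_of_pos (by omega)]
  refine ⟨Int.ediv_nonneg (le_of_lt ht) (by omega), ?_⟩
  have h1 : temp.toNat / d.toNat < temp.toNat := Nat.div_lt_self (by omega) (by omega)
  have ha' : (temp.toNat : Int) = temp := Int.toNat_of_nonneg (le_of_lt ht)
  have hb' : (d.toNat : Int) = d := Int.toNat_of_nonneg (by omega)
  rw [← ha', ← hb', ← Int.natCast_div]
  exact_mod_cast h1

lemma pv_ediv_pos (temp d : Int) (ht : 0 < temp) (hd : 2 ≤ d) (hdvd : d ∣ temp) :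
    0 < temp / d := by
  have h1 : d ≤ temp := Int.le_of_dvd ht hdvd
  obtain ⟨c, hc⟩ := hdvd
  have hc' : temp / d = c := by rw [hc]; exact Int.mul_ediv_cancel_left c (by omega)
  rw [hc']; nlinarith

lemma pvCollect_append : ∀ (fuel : Nat) (d temp : Int), temp.toNat < fuel → 0 < temp → 2 ≤ d →
    ∀ (fs : List Int),
    pvCollect fuel d temp fs = ((pvCollect fuel d temp []).1, fs ++ (pvCollect fuel d temp []).2) := by
  intro fuel
  induction fuel with
  | zero => intro d temp hN; omega
  | succ fuel ih =>
    intro d temp hN ht hd fs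
    by_cases hg : PySem.Int.mod temp d = 0
    · have hdvd : d ∣ temp := (PySem.Int.mod_eq_zero_iff_dvd temp d).mp hg
      have h2 := pv_floordiv_lt temp d ht hd
      have hfd : PySem.Int.floordiv temp d = temp / d := PySem.Int.floordiv_eq_ediv_of_pos (by omega)
      have htd : 0 < PySem.Int.floordiv temp d := by rw [hfd]; exact pv_ediv_pos temp d ht hd hdvd
      simp only [pvCollect, if_pos hg]
      rw [ih d (PySem.Int.floordiv temp d) (by omega) htd hd (fs ++ [d]),
          ih d (PySem.Int.floordiv temp d) (by omega) htd hd ([] ++ [d])]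
      simp
    · simp only [pvCollect, if_neg hg]
      simp

lemma pvCollect_fst_le : ∀ (fuel : Nat) (d temp : Int), temp.toNat < fuel → 0 < temp → 2 ≤ d →
    ∀ (fs : List Int), (pvCollect fuel d temp fs).1 ≤ temp := by
  intro fuel
  induction fuel with
  | zero => intro d temp hN; omega
  | succ fuel ih =>
    intro d temp hN ht hd fs
    by_cases hg : PySem.Int.mod temp d = 0
    · have hdvd : d ∣ temp := (PySem.Int.mod_eq_zero_iff_dvd temp d).mp hg
      have h2 := pv_floordiv_lt temp d ht hd
      have hfd : PySem.Int.floordiv temp d = temp / d := PySem.Int.floordiv_eq_ediv_of_pos (by omega)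
      have htd : 0 < PySem.Int.floordiv temp d := by rw [hfd]; exact pv_ediv_pos temp d ht hd hdvd
      simp only [pvCollect, if_pos hg]
      have := ih d (PySem.Int.floordiv temp d) (by omega) htd hd (fs ++ [d])
      omega
    · simp only [pvCollect, if_neg hg]
      omega

lemma pvCollect_facts : ∀ (fuel : Nat) (d temp : Int), temp.toNat < fuel → 0 < temp → 2 ≤ d →
    0 < (pvCollect fuel d temp []).1 ∧ (pvCollect fuel d temp []).1 ∣ temp ∧
    ¬ d ∣ (pvCollect fuel d temp []).1 ∧ (∀ e ∈ (pvCollect fuel d temp []).2, e = d) := by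
  intro fuel
  induction fuel with
  | zero => intro d temp hN; omega
  | succ fuel ih =>
    intro d temp hN ht hd
    by_cases hg : PySem.Int.mod temp d = 0
    · have hdvd : d ∣ temp := (PySem.Int.mod_eq_zero_iff_dvd temp d).mp hg
      have h2 := pv_floordiv_lt temp d ht hd
      have hfd : PySem.Int.floordiv temp d = temp / d := PySem.Int.floordiv_eq_ediv_of_pos (by omega)
      have htd : 0 < PySem.Int.floordiv temp d := by rw [hfd]; exact pv_ediv_pos temp d ht hd hdvd
      simp only [pvCollect, if_pos hg]
      rw [pvCollect_append fuel d (PySem.Int.floordiv temp d) (by omega) htd hd ([] ++ [d])]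
      obtain ⟨i1, i2, i3, i4⟩ := ih d (PySem.Int.floordiv temp d) (by omega) htd hd
      refine ⟨i1, ?_, i3, ?_⟩
      · exact dvd_trans i2 (by rw [hfd]; exact Int.ediv_dvd_of_dvd hdvd)
      · intro e he; simp at he
        rcases he with he | he
        · exact he
        · exact i4 e he
    · simp only [pvCollect, if_neg hg]
      refine ⟨ht, dvd_refl _, ?_, by simp⟩
      intro hdd
      exact hg ((PySem.Int.mod_eq_zero_iff_dvd temp d).mpr hdd)

lemma pvConsume_spec : ∀ (fuel : Nat) (d temp : Int) (kopia : PySem.Dict Int Int),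
    temp.toNat < fuel → 0 < temp → 2 ≤ d →
    (pvConsume fuel d temp kopia = none ↔
      1 ≤ (pvCollect fuel d temp []).2.length ∧
        kopia.getD d 0 < ((pvCollect fuel d temp []).2.length : Int))
    ∧ (∀ t' k', pvConsume fuel d temp kopia = some (t', k') →
        t' = (pvCollect fuel d temp []).1 ∧ ∀ p : Int, p ≠ d → k'.getD p 0 = kopia.getD p 0) := by
  intro fuel
  induction fuel with
  | zero => intro d temp kopia hN; omega
  | succ fuel ih =>
    intro d temp kopia hN ht hd
    by_cases hg : PySem.Int.mod temp d = 0
    · have hdvd : d ∣ temp := (PySem.Int.mod_eq_zero_iff_dvd temp d).mp hg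
      have h2 := pv_floordiv_lt temp d ht hd
      have hfd : PySem.Int.floordiv temp d = temp / d := PySem.Int.floordiv_eq_ediv_of_pos (by omega)
      have htd : 0 < PySem.Int.floordiv temp d := by rw [hfd]; exact pv_ediv_pos temp d ht hd hdvd
      have hcoll : pvCollect (fuel + 1) d temp [] =
          ((pvCollect fuel d (PySem.Int.floordiv temp d) []).1,
           [d] ++ (pvCollect fuel d (PySem.Int.floordiv temp d) []).2) := by
        simp only [pvCollect, if_pos hg]
        rw [pvCollect_append fuel d (PySem.Int.floordiv temp d) (by omega) htd hd ([] ++ [d])]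
        simp
      by_cases hk : (!kopia.contains d || decide (kopia.getD d 0 ≤ 0)) = true
      · have hnone : pvConsume (fuel + 1) d temp kopia = none := by
          simp only [pvConsume, if_pos hg, if_pos hk]
        have hle0 : kopia.getD d 0 ≤ 0 := by
          rcases Bool.or_eq_true_iff.mp hk with hcf | hle
          · rw [PySem.Dict.getD_of_not_contains kopia 0 (by simpa using hcf)]
          · exact of_decide_eq_true hle
        rw [hnone, hcoll]
        refine ⟨⟨fun _ => ⟨?_, ?_⟩, fun _ => rfl⟩, by simp⟩
        · simp only [List.length_append, List.length_cons, List.length_nil]; omega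
        · simp only [List.length_append, List.length_cons, List.length_nil]; push_cast; omega
      · have hk' := hk
        simp only [Bool.or_eq_true, Bool.not_eq_eq_eq_not, Bool.not_true, decide_eq_true_eq,
          not_or] at hk'
        have hstep : pvConsume (fuel + 1) d temp kopia =
            pvConsume fuel d (PySem.Int.floordiv temp d) (kopia.insert d (kopia.getD d 0 - 1)) := by
          simp only [pvConsume, if_pos hg, if_neg hk]
        obtain ⟨ihn, ihs⟩ := ih d (PySem.Int.floordiv temp d)
          (kopia.insert d (kopia.getD d 0 - 1)) (by omega) htd hd
        have hgetd : (kopia.insert d (kopia.getD d 0 - 1)).getD d 0 = kopia.getD d 0 - 1 :=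
          PySem.Dict.getD_insert_self kopia d (kopia.getD d 0 - 1) 0
        constructor
        · rw [hstep, ihn, hcoll, hgetd]
          simp only [List.length_append, List.length_cons, List.length_nil]
          constructor
          · rintro ⟨hm, hlt⟩; exact ⟨by omega, by push_cast; omega⟩
          · rintro ⟨hm, hlt⟩; push_cast at hlt ⊢
            constructor
            · by_contra hmz
              rw [Nat.not_le] at hmz
              have : (pvCollect fuel d (PySem.Int.floordiv temp d) []).2.length = 0 := by omega
              rw [this] at *; omega
            · omega
        · intro t' k' hsome
          rw [hstep] at hsome
          obtain ⟨he1, he2⟩ := ihs t' k' hsome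
          refine ⟨by rw [hcoll]; exact he1, ?_⟩
          intro p hp
          rw [he2 p hp, PySem.Dict.getD_insert_of_ne kopia (kopia.getD d 0 - 1) 0 hp]
    · have hnc : pvConsume (fuel + 1) d temp kopia = some (temp, kopia) := by
        simp only [pvConsume, if_neg hg]
      have hcc : pvCollect (fuel + 1) d temp [] = (temp, []) := by
        simp only [pvCollect, if_neg hg]
      rw [hnc, hcc]
      refine ⟨by simp, ?_⟩
      rintro t' k' h
      simp at h
      exact ⟨by simp [← h.1], by intro p _; rw [← h.2]⟩

lemma pvFactorLoop_append : ∀ (fuel : Nat) (d temp : Int), (temp + 2 - d).toNat < fuel → 2 ≤ d →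
    ∀ fs, pvFactorLoop fuel d temp fs = fs ++ pvFactorLoop fuel d temp [] := by
  intro fuel
  induction fuel with
  | zero => intro d temp hN; omega
  | succ fuel ih =>
    intro d temp hN hd fs
    by_cases hg : d * d ≤ temp
    · have hdd : d ≤ d * d := le_mul_of_one_le_left (by omega) (by omega)
      have ht : 0 < temp := by omega
      have hC := pvCollect_append (temp.toNat + 1) d temp (by omega) ht hd fs
      have hCle := pvCollect_fst_le (temp.toNat + 1) d temp (by omega) ht hd []
      simp only [pvFactorLoop, if_pos hg]
      rw [hC]
      simp only []
      rw [ih (d + 1) (pvCollect (temp.toNat + 1) d temp []).1 (by omega) (by omega)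
            (fs ++ (pvCollect (temp.toNat + 1) d temp []).2),
          ih (d + 1) (pvCollect (temp.toNat + 1) d temp []).1 (by omega) (by omega)
            ((pvCollect (temp.toNat + 1) d temp []).2)]
      simp
    · simp only [pvFactorLoop, if_neg hg]
      split <;> simp

lemma pvFactorLoop_dvd : ∀ (fuel : Nat) (d temp : Int), (temp + 2 - d).toNat < fuel →
    0 < temp → 2 ≤ d → ∀ e ∈ pvFactorLoop fuel d temp [], e ∣ temp := by
  intro fuel
  induction fuel with
  | zero => intro d temp hN; omega
  | succ fuel ih =>
    intro d temp hN ht hd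
    by_cases hg : d * d ≤ temp
    · have hdd : d ≤ d * d := le_mul_of_one_le_left (by omega) (by omega)
      obtain ⟨f1, f2, f3, f4⟩ := pvCollect_facts (temp.toNat + 1) d temp (by omega) ht hd
      have hCle := pvCollect_fst_le (temp.toNat + 1) d temp (by omega) ht hd []
      simp only [pvFactorLoop, if_pos hg]
      rw [pvFactorLoop_append fuel (d + 1) (pvCollect (temp.toNat + 1) d temp []).1
            (by omega) (by omega)]
      intro e he
      rw [List.mem_append] at he
      rcases he with he | he
      · have hed : e = d := f4 e he
        have hC2ne : (pvCollect (temp.toNat + 1) d temp []).2 ≠ [] := by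
          intro hnil; rw [hnil] at he; simp at he
        have hmod : PySem.Int.mod temp d = 0 := by
          by_contra hm
          have : pvCollect (temp.toNat + 1) d temp [] = (temp, []) := by
            simp only [pvCollect, if_neg hm]
          rw [this] at hC2ne; simp at hC2ne
        rw [hed]
        exact (PySem.Int.mod_eq_zero_iff_dvd temp d).mp hmod
      · have := ih (d + 1) (pvCollect (temp.toNat + 1) d temp []).1 (by omega) f1 (by omega) e he
        exact dvd_trans this f2
    · simp only [pvFactorLoop, if_neg hg]
      split
      · intro e he; simp at he; rw [he]
      · simp

lemma pv_all_counter (xs : List Int) (kopia : PySem.Dict Int Int) :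
    ((PySem.Dict.counter xs).items.all (fun pc => decide (kopia.getD pc.1 0 ≥ pc.2))) = true ↔
      ∀ p ∈ xs, (List.count p xs : Int) ≤ kopia.getD p 0 := by
  rw [PySem.Dict.items_counter]
  simp [List.all_eq_true, PySem.Set.mem_ofList, ge_iff_le]

lemma pvKey_base (fuel : Nat) (temp d : Int) (kopia : PySem.Dict Int Int)
    (hg : ¬ d * d ≤ temp) :
    pvLoopA (fuel + 1) d temp kopia =
      (PySem.Dict.counter (pvFactorLoop (fuel + 1) d temp [])).items.all
        (fun pc => decide (kopia.getD pc.1 0 ≥ pc.2)) := by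
  simp only [pvLoopA, pvFactorLoop, if_neg hg]
  by_cases h1 : 1 < temp
  · rw [if_pos h1, if_pos h1, Bool.eq_iff_iff, pv_all_counter]
    simp only [List.nil_append]
    have hR : (∀ p ∈ [temp], (List.count p [temp] : Int) ≤ kopia.getD p 0) ↔
        1 ≤ kopia.getD temp 0 := by
      constructor
      · intro h
        have := h temp (by simp)
        simpa using this
      · intro h p hp
        simp only [List.mem_singleton] at hp
        subst hp
        simpa using h
    rw [hR]
    by_cases hc : kopia.contains temp = true
    · simp only [hc, Bool.not_true, Bool.false_or, Bool.not_eq_true', decide_eq_false_iff_not,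
        not_le]
      omega
    · simp only [Bool.not_eq_true] at hc
      rw [PySem.Dict.getD_of_not_contains kopia 0 hc]
      simp [hc]
  · rw [if_neg h1, if_neg h1]
    rfl

lemma pvKey : ∀ (fuel : Nat) (temp d : Int) (kopia : PySem.Dict Int Int),
    (temp + 2 - d).toNat < fuel → 2 ≤ d →
    pvLoopA fuel d temp kopia =
      (PySem.Dict.counter (pvFactorLoop fuel d temp [])).items.all
        (fun pc => decide (kopia.getD pc.1 0 ≥ pc.2)) := by
  intro fuel
  induction fuel with
  | zero => intro temp d kopia hN; omega
  | succ fuel ih =>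
    intro temp d kopia hN hd
    by_cases hg : d * d ≤ temp
    · have hdd : d ≤ d * d := le_mul_of_one_le_left (by omega) (by omega)
      have ht : 0 < temp := by omega
      obtain ⟨f1, f2, f3, f4⟩ := pvCollect_facts (temp.toNat + 1) d temp (by omega) ht hd
      have hCle := pvCollect_fst_le (temp.toNat + 1) d temp (by omega) ht hd []
      obtain ⟨hnone, hsome⟩ := pvConsume_spec (temp.toNat + 1) d temp kopia (by omega) ht hd
      have hFeq : pvFactorLoop (fuel + 1) d temp [] =
          (pvCollect (temp.toNat + 1) d temp []).2 ++
            pvFactorLoop fuel (d + 1) (pvCollect (temp.toNat + 1) d temp []).1 [] := by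
        simp only [pvFactorLoop, if_pos hg]
        rw [pvFactorLoop_append fuel (d + 1) (pvCollect (temp.toNat + 1) d temp []).1
              (by omega) (by omega)]
      have hF'ne : ∀ e ∈ pvFactorLoop fuel (d + 1) (pvCollect (temp.toNat + 1) d temp []).1 [],
          e ≠ d := by
        intro e he hed
        have hdvd' : e ∣ (pvCollect (temp.toNat + 1) d temp []).1 :=
          pvFactorLoop_dvd fuel (d + 1) (pvCollect (temp.toNat + 1) d temp []).1
            (by omega) f1 (by omega) e he
        rw [hed] at hdvd'
        exact f3 hdvd'
      have hcntC2 : List.count d (pvCollect (temp.toNat + 1) d temp []).2 =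
          (pvCollect (temp.toNat + 1) d temp []).2.length :=
        List.count_eq_length.mpr (fun b hb => ((f4 b hb).symm))
      have hcntF' :
          List.count d (pvFactorLoop fuel (d + 1) (pvCollect (temp.toNat + 1) d temp []).1 []) = 0 :=
        List.count_eq_zero.mpr (fun hmem => hF'ne d hmem rfl)
      have hstep : pvLoopA (fuel + 1) d temp kopia =
          (match pvConsume (temp.toNat + 1) d temp kopia with
            | none => false
            | some (t', k') => pvLoopA fuel (d + 1) t' k') := by
        simp only [pvLoopA, if_pos hg]
      cases hc : pvConsume (temp.toNat + 1) d temp kopia with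
      | none =>
        rw [hstep, hc]
        show false = _
        obtain ⟨hm1, hlt⟩ := hnone.mp hc
        symm
        rw [← Bool.not_eq_true]
        intro hall
        rw [pv_all_counter] at hall
        have hdC2 : d ∈ (pvCollect (temp.toNat + 1) d temp []).2 := by
          obtain ⟨e, he⟩ := List.exists_mem_of_length_pos
            (l := (pvCollect (temp.toNat + 1) d temp []).2) (by omega)
          rw [f4 e he] at he; exact he
        have := hall d (by rw [hFeq]; exact List.mem_append_left _ hdC2)
        rw [hFeq, List.count_append, hcntC2, hcntF'] at this
        push_cast at this
        omega
      | some tk =>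
        obtain ⟨t', k'⟩ := tk
        obtain ⟨ht', hk'⟩ := hsome t' k' hc
        have hok : ¬ (1 ≤ (pvCollect (temp.toNat + 1) d temp []).2.length ∧
            kopia.getD d 0 < ((pvCollect (temp.toNat + 1) d temp []).2.length : Int)) := by
          rw [← hnone]; intro h; rw [h] at hc; cases hc
        have hgd : (pvCollect (temp.toNat + 1) d temp []).2.length = 0 ∨
            (((pvCollect (temp.toNat + 1) d temp []).2.length : Int)) ≤ kopia.getD d 0 := by
          by_cases h0 : (pvCollect (temp.toNat + 1) d temp []).2.length = 0
          · exact Or.inl h0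
          · refine Or.inr ?_
            by_contra hlt
            exact hok ⟨by omega, by omega⟩
        rw [hstep, hc]
        show pvLoopA fuel (d + 1) t' k' = _
        rw [ih t' (d + 1) k' (by omega) (by omega), ht']
        rw [Bool.eq_iff_iff, pv_all_counter, pv_all_counter, hFeq]
        constructor
        · intro h p hp
          rw [List.mem_append] at hp
          rw [List.count_append]
          rcases hp with hp | hp
          · have hpd : p = d := f4 p hp
            have hm1 := List.length_pos_of_mem hp
            rw [hpd, hcntC2, hcntF']
            rcases hgd with h0 | h0
            · omega
            · push_cast
              omega
          · have hpd : p ≠ d := hF'ne p hp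
            have hcnt0 : List.count p (pvCollect (temp.toNat + 1) d temp []).2 = 0 :=
              List.count_eq_zero.mpr (fun hmem => hpd (f4 p hmem))
            rw [hcnt0]
            have := h p hp
            rw [hk' p hpd] at this
            push_cast
            omega
        · intro h p hp
          have hpd : p ≠ d := hF'ne p hp
          have := h p (List.mem_append_right _ hp)
          rw [List.count_append] at this
          have hcnt0 : List.count p (pvCollect (temp.toNat + 1) d temp []).2 = 0 :=
            List.count_eq_zero.mpr (fun hmem => hpd (f4 p hmem))
          rw [hcnt0] at this
          rw [hk' p hpd]
          push_cast at this ⊢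
          omega
    · exact pvKey_base fuel temp d kopia hg

-- ---------- B-side lemmas ----------

-- An Int ≥ 2 with no divisor m with 2 ≤ m and m*m ≤ p is prime.
lemma pv_int_prime (p : Int) (h2 : 2 ≤ p)
    (h : ∀ m : Int, 2 ≤ m → m * m ≤ p → ¬ m ∣ p) : Prime p := by
  rw [Int.prime_iff_natAbs_prime]
  rw [Nat.prime_def_lt]
  refine ⟨by omega, ?_⟩
  intro m hm hdvd
  by_contra hm1
  have hm0 : m ≠ 0 := by
    rintro rfl
    have := Nat.eq_zero_of_zero_dvd hdvd
    omega
  have hm2 : 2 ≤ m := by omega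
  have hdvdInt : (m : Int) ∣ p := by
    have h1 : (m : Int) ∣ (p.natAbs : Int) := Int.natCast_dvd_natCast.mpr hdvd
    rwa [Int.natAbs_of_nonneg (by omega)] at h1
  have hmp : (m : Int) < p := by
    have h1 : (m : Int) < (p.natAbs : Int) := by exact_mod_cast hm
    rwa [Int.natAbs_of_nonneg (by omega)] at h1
  obtain ⟨m', hm'⟩ := hdvdInt
  have hm'pos : 0 < m' := by nlinarith
  have hne : m' ≠ 1 := by rintro rfl; simp at hm'; omega
  have hm'2 : 2 ≤ m' := by omega
  by_cases hcmp : (m : Int) ≤ m'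
  · exact h m (by exact_mod_cast hm2) (by nlinarith) ⟨m', hm'⟩
  · exact h m' hm'2 (by nlinarith) ⟨m, by linarith [hm', mul_comm (m : Int) m']⟩

-- pvCollect preserves the product.
lemma pvCollect_prod : ∀ (fuel : Nat) (d temp : Int), temp.toNat < fuel → 0 < temp → 2 ≤ d →
    (pvCollect fuel d temp []).1 * ((pvCollect fuel d temp []).2).prod = temp := by
  intro fuel
  induction fuel with
  | zero => intro d temp hN; omega
  | succ fuel ih =>
    intro d temp hN ht hd
    by_cases hg : PySem.Int.mod temp d = 0
    · have hdvd : d ∣ temp := (PySem.Int.mod_eq_zero_iff_dvd temp d).mp hg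
      have h2 := pv_floordiv_lt temp d ht hd
      have hfd : PySem.Int.floordiv temp d = temp / d := PySem.Int.floordiv_eq_ediv_of_pos (by omega)
      have htd : 0 < PySem.Int.floordiv temp d := by rw [hfd]; exact pv_ediv_pos temp d ht hd hdvd
      simp only [pvCollect, if_pos hg]
      rw [pvCollect_append fuel d (PySem.Int.floordiv temp d) (by omega) htd hd ([] ++ [d])]
      have hih := ih d (PySem.Int.floordiv temp d) (by omega) htd hd
      simp only [List.nil_append, List.cons_append, List.prod_cons] at *
      have hdt : d * (temp / d) = temp := Int.mul_ediv_cancel' hdvd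
      rw [hfd] at hih
      calc (pvCollect fuel d (PySem.Int.floordiv temp d) []).1 *
            (d * ((pvCollect fuel d (PySem.Int.floordiv temp d) []).2).prod)
          = d * ((pvCollect fuel d (PySem.Int.floordiv temp d) []).1 *
            ((pvCollect fuel d (PySem.Int.floordiv temp d) []).2).prod) := by ring
        _ = d * (temp / d) := by rw [hfd, hih]
        _ = temp := hdt
    · simp only [pvCollect, if_neg hg]
      simp

-- The factor list of temp (no divisors below d) multiplies back to temp and consists of primes ≥ 2.
lemma pvFactorLoop_facts : ∀ (fuel : Nat) (d temp : Int), (temp + 2 - d).toNat < fuel →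
    0 < temp → 2 ≤ d → (∀ k : Int, 2 ≤ k → k < d → ¬ k ∣ temp) →
    (pvFactorLoop fuel d temp []).prod = temp ∧
      ∀ e ∈ pvFactorLoop fuel d temp [], Prime e ∧ 2 ≤ e := by
  intro fuel
  induction fuel with
  | zero => intro d temp hN; omega
  | succ fuel ih =>
    intro d temp hN ht hd hnd
    by_cases hg : d * d ≤ temp
    · have hdd : d ≤ d * d := le_mul_of_one_le_left (by omega) (by omega)
      obtain ⟨f1, f2, f3, f4⟩ := pvCollect_facts (temp.toNat + 1) d temp (by omega) ht hd
      have hCle := pvCollect_fst_le (temp.toNat + 1) d temp (by omega) ht hd []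
      have hCprod := pvCollect_prod (temp.toNat + 1) d temp (by omega) ht hd
      have hFeq : pvFactorLoop (fuel + 1) d temp [] =
          (pvCollect (temp.toNat + 1) d temp []).2 ++
            pvFactorLoop fuel (d + 1) (pvCollect (temp.toNat + 1) d temp []).1 [] := by
        simp only [pvFactorLoop, if_pos hg]
        rw [pvFactorLoop_append fuel (d + 1) (pvCollect (temp.toNat + 1) d temp []).1
              (by omega) (by omega)]
      have hnd' : ∀ k : Int, 2 ≤ k → k < d + 1 → ¬ k ∣ (pvCollect (temp.toNat + 1) d temp []).1 := by
        intro k hk hkd hdvd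
        rcases lt_or_eq_of_le (show k ≤ d by omega) with hlt | heq
        · exact hnd k hk hlt (dvd_trans hdvd f2)
        · rw [heq] at hdvd; exact f3 hdvd
      obtain ⟨ihp, ihq⟩ := ih (d + 1) (pvCollect (temp.toNat + 1) d temp []).1 (by omega) f1
        (by omega) hnd'
      constructor
      · rw [hFeq, List.prod_append, ihp]
        calc ((pvCollect (temp.toNat + 1) d temp []).2).prod * (pvCollect (temp.toNat + 1) d temp []).1
            = (pvCollect (temp.toNat + 1) d temp []).1 *
              ((pvCollect (temp.toNat + 1) d temp []).2).prod := by ring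
          _ = temp := hCprod
      · intro e he
        rw [hFeq, List.mem_append] at he
        rcases he with he | he
        · have hed : e = d := f4 e he
          have hC2ne : (pvCollect (temp.toNat + 1) d temp []).2 ≠ [] := by
            intro hnil; rw [hnil] at he; simp at he
          have hmod : PySem.Int.mod temp d = 0 := by
            by_contra hm
            have hz : pvCollect (temp.toNat + 1) d temp [] = (temp, []) := by
              simp only [pvCollect, if_neg hm]
            rw [hz] at hC2ne; simp at hC2ne
          have hddvd : d ∣ temp := (PySem.Int.mod_eq_zero_iff_dvd temp d).mp hmod
          rw [hed]
          refine ⟨?_, hd⟩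
          apply pv_int_prime d hd
          intro m hm hmm hdvdm
          have hmd : m < d := by nlinarith
          exact hnd m hm hmd (dvd_trans hdvdm hddvd)
        · exact ihq e he
    · simp only [pvFactorLoop, if_neg hg]
      by_cases h1 : 1 < temp
      · rw [if_pos h1]
        refine ⟨by simp, ?_⟩
        intro e he
        simp only [List.nil_append, List.mem_singleton] at he
        subst he
        refine ⟨?_, by omega⟩
        apply pv_int_prime e (by omega)
        intro m hm hmm hdvd
        have hmd : m < d := by nlinarith
        exact hnd m hm hmd hdvd
      · rw [if_neg h1]
        have htemp1 : temp = 1 := by omega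
        exact ⟨by simp [htemp1], by simp⟩

-- Correctness of B's primality test.
lemma pvIsPrimeLoop_spec : ∀ (fuel : Nat) (d p : Int), (p + 2 - d).toNat < fuel → 2 ≤ d →
    (pvIsPrimeLoop fuel d p = true ↔ ∀ m : Int, d ≤ m → m * m ≤ p → ¬ m ∣ p) := by
  intro fuel
  induction fuel with
  | zero => intro d p hN; omega
  | succ fuel ih =>
    intro d p hN hd
    by_cases hg : d * d ≤ p
    · have hdp : d ≤ p := le_trans (le_mul_of_one_le_left (by omega) (by omega)) hg
      by_cases hm : PySem.Int.mod p d = 0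
      · simp only [pvIsPrimeLoop, if_pos hg, if_pos hm]
        constructor
        · intro hff; cases hff
        · intro h
          exact ((h d le_rfl hg) ((PySem.Int.mod_eq_zero_iff_dvd p d).mp hm)).elim
      · simp only [pvIsPrimeLoop, if_pos hg, if_neg hm]
        rw [ih (d + 1) p (by omega) (by omega)]
        constructor
        · intro h m hdm hmm hdvd
          rcases eq_or_lt_of_le hdm with heq | hlt
          · rw [← heq] at hdvd
            exact hm ((PySem.Int.mod_eq_zero_iff_dvd p d).mpr hdvd)
          · exact h m (by omega) hmm hdvd
        · intro h m hdm hmm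
          exact h m (by omega) hmm
    · simp only [pvIsPrimeLoop, if_neg hg]
      constructor
      · intro _ m hdm hmm hdvd
        have : d * d ≤ m * m := by nlinarith
        omega
      · intro _; trivial

lemma pvIsPrime_iff (p : Int) : pvIsPrime p = true ↔ (2 ≤ p ∧ Prime p) := by
  unfold pvIsPrime
  by_cases hp2 : p < 2
  · rw [if_pos hp2]
    constructor
    · intro hff; cases hff
    · rintro ⟨h2, _⟩; omega
  · rw [if_neg hp2]
    rw [pvIsPrimeLoop_spec (p.toNat + 1) 2 p (by omega) (by omega)]
    constructor
    · intro h
      exact ⟨by omega, pv_int_prime p (by omega) (fun m hm => h m hm)⟩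
    · rintro ⟨h2, hp⟩ m hm hmm hdvd
      rw [Int.prime_iff_natAbs_prime] at hp
      have hdN : m.natAbs ∣ p.natAbs := Int.natAbs_dvd_natAbs.mpr hdvd
      rcases Nat.Prime.eq_one_or_self_of_dvd hp _ hdN with h1 | hs
      · omega
      · have hmp : m = p := by omega
        nlinarith

-- Products of multisets of integers ≥ 2.
lemma pv_msProd_eq_one (M : Multiset Int) (h : ∀ a ∈ M, 2 ≤ a) : M.prod = 1 ↔ M = 0 := by
  constructor
  · intro h1
    by_contra hne
    obtain ⟨a, ha⟩ := Multiset.exists_mem_of_ne_zero hne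
    have hdvd : a ∣ M.prod := Multiset.dvd_prod ha
    rw [h1] at hdvd
    have hle := Int.le_of_dvd one_pos hdvd
    have := h a ha
    omega
  · rintro rfl; simp

lemma pv_prime_dvd_mem (p : Int) (hp : Prime p) (hp2 : 2 ≤ p) :
    ∀ (M : Multiset Int), (∀ a ∈ M, Prime a ∧ 2 ≤ a) → (p ∣ M.prod ↔ p ∈ M) := by
  intro M
  induction M using Multiset.induction_on with
  | empty =>
    intro _
    simp only [Multiset.prod_zero]
    constructor
    · intro h; exact absurd (isUnit_of_dvd_one h) hp.not_unit
    · intro h; simp at h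
  | cons a s ih =>
    intro hM
    rw [Multiset.prod_cons, Multiset.mem_cons]
    have ha := hM a (Multiset.mem_cons_self a s)
    have ihs := ih (fun b hb => hM b (Multiset.mem_cons_of_mem hb))
    constructor
    · intro hdvd
      rcases hp.2.2 a s.prod hdvd with h1 | h2
      · left
        have hN : p.natAbs ∣ a.natAbs := Int.natAbs_dvd_natAbs.mpr h1
        rcases Nat.Prime.eq_one_or_self_of_dvd (Int.prime_iff_natAbs_prime.mp ha.1) _ hN
          with hh | hh
        · have := ha.2; omega
        · have := ha.2; omega
      · right; exact ihs.mp h2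
    · rintro (rfl | hmem)
      · exact dvd_mul_right p s.prod
      · exact dvd_mul_of_dvd_right (ihs.mpr hmem) a

-- B's inner while loop removes min(k, multiplicity of p) copies of p from the product.
lemma pvDivLoop_prod : ∀ (fuel : Nat) (p k : Int) (M : Multiset Int), k.toNat < fuel →
    Prime p → 2 ≤ p → (∀ a ∈ M, Prime a ∧ 2 ≤ a) →
    pvDivLoop fuel p k M.prod = (M - Multiset.replicate (min k.toNat (M.count p)) p).prod := by
  intro fuel
  induction fuel with
  | zero => intro p k M hN; omega
  | succ fuel ih =>
    intro p k M hN hp hp2 hM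
    by_cases hc : 0 < k ∧ PySem.Int.mod M.prod p = 0
    · obtain ⟨hk, hmod⟩ := hc
      have hdvd : p ∣ M.prod := (PySem.Int.mod_eq_zero_iff_dvd _ p).mp hmod
      have hmem : p ∈ M := (pv_prime_dvd_mem p hp hp2 M hM).mp hdvd
      have hcnt : 1 ≤ M.count p := Multiset.one_le_count_iff_mem.mpr hmem
      have hprodE : M.prod = p * (M.erase p).prod := by
        conv_lhs => rw [← Multiset.cons_erase hmem]
        rw [Multiset.prod_cons]
      have hfd : PySem.Int.floordiv M.prod p = (M.erase p).prod := by
        rw [PySem.Int.floordiv_eq_ediv_of_pos (by omega), hprodE,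
          Int.mul_ediv_cancel_left _ (by omega)]
      simp only [pvDivLoop, if_pos (And.intro hk hmod)]
      rw [hfd]
      have hME : ∀ a ∈ M.erase p, Prime a ∧ 2 ≤ a :=
        fun a haa => hM a (Multiset.mem_of_mem_erase haa)
      rw [ih p (k - 1) (M.erase p) (by omega) hp hp2 hME]
      congr 1
      have hcntE : (M.erase p).count p = M.count p - 1 := by
        rw [Multiset.count_erase_self]
      rw [hcntE]
      have hmin : min k.toNat (M.count p) = min (k - 1).toNat (M.count p - 1) + 1 := by omega
      rw [hmin, Multiset.replicate_succ, Multiset.sub_cons]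
    · simp only [pvDivLoop, if_neg hc]
      push_neg at hc
      by_cases hk : 0 < k
      · have hmod : PySem.Int.mod M.prod p ≠ 0 := hc hk
        have hnd : ¬ p ∣ M.prod := fun hd => hmod ((PySem.Int.mod_eq_zero_iff_dvd _ _).mpr hd)
        have hnm : p ∉ M := fun hm => hnd ((pv_prime_dvd_mem p hp hp2 M hM).mpr hm)
        have hz : M.count p = 0 := Multiset.count_eq_zero.mpr hnm
        rw [hz]
        simp
      · have hz : k.toNat = 0 := by omega
        rw [hz]
        simp

-- First-match lookup with default 0 on an association list (what Python's dict.get does here).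
def pvCap : List (Int × Int) → Int → Int
  | [], _ => 0
  | (p, c) :: t, q => if p = q then c else pvCap t q

lemma pvCap_of_not_mem : ∀ (L : List (Int × Int)) (q : Int), q ∉ L.map Prod.fst →
    pvCap L q = 0 := by
  intro L
  induction L with
  | nil => intro q _; rfl
  | cons pc t ih =>
    intro q hq
    obtain ⟨p, c⟩ := pc
    simp only [List.map_cons, List.mem_cons, not_or] at hq
    simp only [pvCap, ih q hq.2]
    rw [if_neg (show ¬ p = q from fun h => hq.1 h.symm)]

lemma pvCap_get? : ∀ (L : List (Int × Int)) (q : Int),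
    pvCap L q = ((PySem.Dict.mk L).get? q).getD 0 := by
  intro L
  induction L with
  | nil => intro q; rfl
  | cons pc t ih =>
    intro q
    obtain ⟨p, c⟩ := pc
    rw [PySem.Dict.get?_mk_cons]
    by_cases h : p = q
    · simp [pvCap, h]
    · simp only [pvCap, if_neg h, ih q]
      have hb : (p == q) = false := by simpa using h
      rw [hb]
      simp

lemma pvCap_getD (d : PySem.Dict Int Int) (q : Int) : pvCap d.items q = d.getD q 0 := by
  rw [PySem.Dict.getD_eq_get?_getD]
  exact pvCap_get? d.items q

-- B's for-loop over the warehouse: the product reaches 1 iff the warehouse covers every multiplicity.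
lemma pv_fold_one : ∀ (L : List (Int × Int)) (M : Multiset Int),
    (∀ a ∈ M, Prime a ∧ 2 ≤ a) → (L.map Prod.fst).Nodup →
    ((L.foldl (fun temp pc => if pvIsPrime pc.1 then pvDivLoop (pc.2.toNat + 1) pc.1 pc.2 temp else temp)
        M.prod = 1)
      ↔ ∀ q ∈ M, (M.count q : Int) ≤ pvCap L q) := by
  intro L
  induction L with
  | nil =>
    intro M hM _
    simp only [List.foldl_nil]
    rw [pv_msProd_eq_one M (fun a ha => (hM a ha).2)]
    constructor
    · rintro rfl q hq; simp at hq
    · intro h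
      by_contra hne
      obtain ⟨a, ha⟩ := Multiset.exists_mem_of_ne_zero hne
      have h1 : 1 ≤ M.count a := Multiset.one_le_count_iff_mem.mpr ha
      have h2 := h a ha
      simp only [pvCap] at h2
      omega
  | cons pc t ih =>
    intro M hM hnd
    obtain ⟨p, c⟩ := pc
    simp only [List.foldl_cons]
    rw [List.map_cons] at hnd
    have hnd' := List.nodup_cons.mp hnd
    have hpnt : p ∉ t.map Prod.fst := hnd'.1
    have hndt : (t.map Prod.fst).Nodup := hnd'.2
    by_cases hpp : pvIsPrime p = true
    · obtain ⟨hp2, hprime⟩ := (pvIsPrime_iff p).mp hpp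
      have hstep : (if pvIsPrime p then pvDivLoop (c.toNat + 1) p c M.prod else M.prod) =
          (M - Multiset.replicate (min c.toNat (M.count p)) p).prod := by
        rw [if_pos hpp]
        exact pvDivLoop_prod (c.toNat + 1) p c M (by omega) hprime hp2 hM
      set M1 := M - Multiset.replicate (min c.toNat (M.count p)) p with hM1def
      have hle : M1 ≤ M := tsub_le_self
      have hM1mem : ∀ a ∈ M1, Prime a ∧ 2 ≤ a := fun a ha => hM a (Multiset.mem_of_le hle ha)
      have hcnt1 : ∀ q, M1.count q = M.count q - (if q = p then min c.toNat (M.count p) else 0) := by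
        intro q
        rw [hM1def, Multiset.count_sub, Multiset.count_replicate]
        rcases eq_or_ne q p with h | h
        · simp [h]
        · simp [h, Ne.symm h]
      rw [hstep]
      rw [ih M1 hM1mem hndt]
      constructor
      · intro h q hq
        have hm1 : 1 ≤ M.count q := Multiset.one_le_count_iff_mem.mpr hq
        by_cases hqp : q = p
        · subst hqp
          have hcapc : pvCap ((q, c) :: t) q = c := by simp [pvCap]
          rw [hcapc]
          by_cases hcm : M.count q ≤ c.toNat
          · omega
          · exfalso
            have hmn : min c.toNat (M.count q) = c.toNat := Nat.min_eq_left (by omega)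
            have hq1 : q ∈ M1 := by
              rw [← Multiset.one_le_count_iff_mem, hcnt1 q, if_pos rfl, hmn]
              omega
            have h2 := h q hq1
            rw [hcnt1 q, if_pos rfl, hmn, pvCap_of_not_mem t q hpnt] at h2
            omega
        · have hc1 : M1.count q = M.count q := by rw [hcnt1 q, if_neg hqp]; omega
          have hq1 : q ∈ M1 := by rw [← Multiset.one_le_count_iff_mem, hc1]; omega
          have h2 := h q hq1
          rw [hc1] at h2
          have hne' : p ≠ q := fun h' => hqp h'.symm
          simpa only [pvCap, if_neg hne'] using h2
      · intro h q hq1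
        have hqM : q ∈ M := Multiset.mem_of_le hle hq1
        have hm1 : 1 ≤ M.count q := Multiset.one_le_count_iff_mem.mpr hqM
        have hm1' : 1 ≤ M1.count q := Multiset.one_le_count_iff_mem.mpr hq1
        by_cases hqp : q = p
        · subst hqp
          have hcap := h q hqM
          have hcapc : pvCap ((q, c) :: t) q = c := by simp [pvCap]
          rw [hcapc] at hcap
          rw [hcnt1 q, if_pos rfl] at hm1'
          exfalso
          rcases min_choice c.toNat (M.count q) with hmn | hmn <;> omega
        · have hcap := h q hqM
          have hne' : p ≠ q := fun h' => hqp h'.symm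
          simp only [pvCap, if_neg hne'] at hcap
          rw [hcnt1 q, if_neg hqp]
          simpa using hcap
    · rw [if_neg hpp]
      rw [ih M hM hndt]
      constructor
      · intro h q hq
        have hq2 := hM q hq
        have hqp : p ≠ q := by
          rintro rfl
          exact hpp ((pvIsPrime_iff p).mpr ⟨hq2.2, hq2.1⟩)
        simp only [pvCap, if_neg hqp]
        exact h q hq
      · intro h q hq
        have hq2 := hM q hq
        have hqp : p ≠ q := by
          rintro rfl
          exact hpp ((pvIsPrime_iff p).mpr ⟨hq2.2, hq2.1⟩)
        have h2 := h q hq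
        simpa only [pvCap, if_neg hqp] using h2

-- ===== VERDICT (by name: the statement is the Claim_ definition above) =====
theorem czy_mozna_zlozyc_spec : Claim_equal_czy_mozna_zlozyc := by
  intro n magazyn _
  unfold Spec_czy_mozna_zlozyc czy_mozna_zlozyc czy_mozna_zlozyc_alt
  by_cases hn : n < 2
  · rw [if_pos hn]
    have h4 : ¬ ((2:Int) * 2 ≤ n) := by omega
    have h1 : ¬ ((1:Int) < n) := by omega
    simp only [pvLoopA, if_neg h4, if_neg h1]
  · rw [if_neg hn]
    have hn2 : 2 ≤ n := by omega
    set D := PySem.Dict.ofList magazyn with hD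
    set F := pvFactorLoop (n.toNat + 1) 2 n [] with hF
    obtain ⟨hprod, hprim⟩ := pvFactorLoop_facts (n.toNat + 1) 2 n (by omega) (by omega)
      (by omega) (by intro k hk hkd; omega)
    have hA : pvLoopA (n.toNat + 1) 2 n D =
        (PySem.Dict.counter F).items.all (fun pc => decide (D.getD pc.1 0 ≥ pc.2)) :=
      pvKey (n.toNat + 1) n 2 D (by omega) (by omega)
    have hMprim : ∀ a ∈ (F : Multiset Int), Prime a ∧ 2 ≤ a := by
      simpa using hprim
    have hMprod : (F : Multiset Int).prod = n := by
      simpa using hprod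
    have hnodup : (D.items.map Prod.fst).Nodup := by
      have := PySem.Dict.nodup_keys_ofList (κ := Int) (ν := Int) magazyn
      simpa [PySem.Dict.keys] using this
    have hfold := pv_fold_one D.items (F : Multiset Int) hMprim hnodup
    rw [hA, Bool.eq_iff_iff, pv_all_counter, decide_eq_true_iff, ← hMprod, hfold]
    constructor
    · intro h q hq
      rw [pvCap_getD, Multiset.coe_count]
      exact h q (by simpa using hq)
    · intro h q hq
      have := h q (by simpa using hq)
      rwa [pvCap_getD, Multiset.coe_count] at this
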